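-- pv_equiv track=rewrite | github.com/appth0/adventofcode2023 | day12/challenge1/task.py | is_valid_arrangement
-- ===== SOURCE A (Python) =====
-- def is_valid_arrangement(record, required_config):
--     record_parts = [x for x in record.strip().split(".") if len(x) > 0]
--     if len(record_parts) != len(required_config):
--         return False
--     for i, req in enumerate(required_config):
--         if len(record_parts[i]) != req:
--             return False
--     return True
-- ===== SOURCE B (Python) =====
-- def is_valid_arrangement(record, required_config):
--     # One pass over the stripped record: keep a running run length of non-'.' chars
--     # and match each finished run against the front of the remaining config.
--     remaining = list(required_config)
--     run = 0
--     for ch in record.strip():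
--         if ch == '.':
--             if run:
--                 if not remaining or remaining[0] != run:
--                     return False
--                 remaining.pop(0)
--                 run = 0
--         else:
--             run += 1
--     if run:
--         if not remaining or remaining[0] != run:
--             return False
--         remaining.pop(0)
--     return not remaining
-- ===== Notes on version B (the rewrite author's own statement) =====
-- stated objective: alternative
-- what changed: Replaces split('.')+filter+length-check+indexed loop with a single character scan that maintains a current run length and consumes the required config from the front.
import Mathlib
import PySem

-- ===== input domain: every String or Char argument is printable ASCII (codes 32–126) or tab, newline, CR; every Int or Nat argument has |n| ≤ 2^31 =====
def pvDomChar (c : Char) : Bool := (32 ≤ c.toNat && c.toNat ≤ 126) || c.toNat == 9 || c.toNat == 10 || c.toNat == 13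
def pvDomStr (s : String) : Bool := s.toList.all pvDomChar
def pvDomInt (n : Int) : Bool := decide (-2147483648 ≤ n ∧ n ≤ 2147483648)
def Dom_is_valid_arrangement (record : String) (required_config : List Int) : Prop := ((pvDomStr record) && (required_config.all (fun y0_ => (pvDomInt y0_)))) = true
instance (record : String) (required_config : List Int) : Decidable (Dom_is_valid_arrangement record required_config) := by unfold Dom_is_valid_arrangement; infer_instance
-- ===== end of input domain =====

-- B replaces split('.')+filter+indexed loop with a single scan keeping a run length; alternative decomposition, same cost.
-- ===== PORT A =====
-- body of "for i, req in enumerate(required_config): if len(record_parts[i]) != req: return False"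
-- (the pyGet? none branch is unreachable: the length guard keeps every index in range)
def pvALoop (parts : List (List Char)) : List (Int × Int) → Bool
  | [] => true
  | (i, req) :: rest =>
    match PySem.List.pyGet? parts i with
    | none => false
    | some p => if (p.length : Int) ≠ req then false else pvALoop parts rest

def is_valid_arrangement (record : String) (required_config : List Int) : Bool :=
  let record_parts := (PySem.Chars.splitOn (PySem.Str.strip record).toList ".".toList).filter
      (fun x => decide (0 < x.length))
  if record_parts.length ≠ required_config.length then false
  else pvALoop record_parts (PySem.List.enumerate required_config)

-- ===== PORT B =====
-- the for-loop of Source B: state = (current run length, remaining config); the [] case is the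
-- code after the loop (close the final run, then "return not remaining")
def pvBScan : List Char → Nat → List Int → Bool
  | [], run, remaining =>
      if run ≠ 0 then
        match remaining with
        | [] => false
        | r :: rest => if r ≠ (run : Int) then false else rest.isEmpty
      else remaining.isEmpty
  | c :: cs, run, remaining =>
      if c = '.' then
        if run ≠ 0 then
          match remaining with
          | [] => false
          | r :: rest => if r ≠ (run : Int) then false else pvBScan cs 0 rest
        else pvBScan cs 0 remaining
      else pvBScan cs (run + 1) remaining

def is_valid_arrangement_alt (record : String) (required_config : List Int) : Bool :=
  pvBScan (PySem.Str.strip record).toList 0 required_config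

-- ===== PRECONDITION & SPEC =====
def Spec_is_valid_arrangement (record : String) (required_config : List Int) (out : Bool) : Prop := out = is_valid_arrangement_alt record required_config
instance (record : String) (required_config : List Int) (out : Bool) : Decidable (Spec_is_valid_arrangement record required_config out) := by unfold Spec_is_valid_arrangement; infer_instance

-- ===== CLAIM (what is proved, stated in full; the proofs are below) =====
def Claim_equal_is_valid_arrangement : Prop := ∀ (record : String) (required_config : List Int), Dom_is_valid_arrangement record required_config → Spec_is_valid_arrangement record required_config (is_valid_arrangement record required_config)

-- ===== LEMMAS AND PROOFS =====

-- ===== VERDICT (by name: the statement is the Claim_ definition above) =====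
-- mirror of PySem.Chars.splitOn.go with sep = ['.'] and enough fuel
def pvSp : List Char → List Char → List (List Char)
  | [], cur => [cur.reverse]
  | c :: rest, cur => if c = '.' then cur.reverse :: pvSp rest [] else pvSp rest (c :: cur)

-- the group-length list of l when the current run already has length `run`
def pvG : List Char → Nat → List Int
  | [], run => if run = 0 then [] else [(run : Int)]
  | c :: rest, run =>
      if c = '.' then (if run = 0 then pvG rest 0 else (run : Int) :: pvG rest 0)
      else pvG rest (run + 1)

theorem pvGo_eq (fuel : Nat) : ∀ (l cur : List Char) (accs : List (List Char)),
    l.length ≤ fuel →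
    PySem.Chars.splitOn.go ['.'] fuel l cur accs = accs.reverse ++ pvSp l cur := by
  induction fuel with
  | zero =>
    intro l cur accs h
    cases l with
    | nil => simp [PySem.Chars.splitOn.go, pvSp]
    | cons c rest => simp at h
  | succ fuel ih =>
    intro l cur accs h
    cases l with
    | nil => simp [PySem.Chars.splitOn.go, pvSp]
    | cons c rest =>
      simp only [PySem.Chars.splitOn.go, List.isPrefixOf_cons₂, List.isPrefixOf_nil_left,
        Bool.and_true, pvSp]
      by_cases hc : c = '.'
      · simp only [hc, beq_self_eq_true, if_pos, List.length_cons, List.drop_succ_cons,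
          List.drop_zero]
        simp only [List.length_nil, List.drop_zero]
        rw [ih rest [] (cur.reverse :: accs) (Nat.le_of_succ_le_succ h)]
        simp only [List.reverse_cons, List.append_assoc, List.cons_append, List.nil_append]
      · have : (('.' : Char) == c) = false := beq_eq_false_iff_ne.mpr (fun e => hc e.symm)
        simp only [this, Bool.false_eq_true, if_neg, if_false]
        rw [ih rest (c :: cur) accs (Nat.le_of_succ_le_succ h)]
        rw [if_neg hc]

theorem pvSplitOn_eq (cs : List Char) : PySem.Chars.splitOn cs ['.'] = pvSp cs [] := by
  unfold PySem.Chars.splitOn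
  rw [pvGo_eq (cs.length + 1) cs [] [] (by omega)]
  simp

theorem pvBScan_eq (l : List Char) : ∀ (run : Nat) (rem : List Int),
    pvBScan l run rem = decide (pvG l run = rem) := by
  induction l with
  | nil =>
    intro run rem
    simp only [pvBScan, pvG]
    by_cases hr : run = 0
    · simp [hr]
      cases rem <;> simp
    · simp only [hr, if_neg, if_false]
      cases rem with
      | nil => simp [hr]
      | cons r rest =>
        by_cases hq : r = (run : Int)
        · subst hq; cases rest <;> simp [hr]
        · simp [hr, hq, Ne.symm hq]
  | cons c cs ih =>
    intro run rem
    simp only [pvBScan, pvG]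
    by_cases hc : c = '.'
    · simp only [hc, if_pos]
      by_cases hr : run = 0
      · simp [hr, ih]
      · simp only [hr, if_neg, if_false]
        cases rem with
        | nil => simp [hr]
        | cons r rest =>
          by_cases hq : r = (run : Int)
          · subst hq; simp [hr, ih]
          · simp [hr, hq, Ne.symm hq]
    · simp [hc, ih]

theorem pvSp_filter_map (l : List Char) : ∀ (cur : List Char),
    ((pvSp l cur).filter (fun p => decide (0 < p.length))).map (fun p => ((p.length : Int))) =
      pvG l cur.length := by
  induction l with
  | nil =>
    intro cur
    cases cur <;> simp [pvSp, pvG]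
  | cons c cs ih =>
    intro cur
    by_cases hc : c = '.'
    · cases cur with
      | nil => simp [pvSp, pvG, hc, ih]
      | cons d ds => simpa [pvSp, pvG, hc] using ih []
    · simpa [pvSp, pvG, hc] using ih (c :: cur)

theorem pvALoop_eq (cfg : List Int) : ∀ (parts : List (List Char)) (k : Nat),
    parts.length = k + cfg.length →
    pvALoop parts (PySem.List.enumerate cfg (k : Int)) =
      decide ((parts.drop k).map (fun p => ((p.length : Int))) = cfg) := by
  induction cfg with
  | nil =>
    intro parts k h
    simp only [List.length_nil, Nat.add_zero] at h
    rw [PySem.List.enumerate_nil]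
    simp [pvALoop, List.drop_of_length_le (le_of_eq h)]
  | cons req cfg ih =>
    intro parts k h
    have hk : k < parts.length := by simp at h; omega
    have hdrop : parts.drop k = parts[k] :: parts.drop (k + 1) := List.drop_eq_getElem_cons hk
    rw [PySem.List.enumerate_cons]
    simp only [pvALoop]
    rw [show ((k : Int) + 1) = ((k + 1 : Nat) : Int) by push_cast; ring]
    rw [PySem.List.pyGet?_natCast, List.getElem?_eq_getElem hk]
    simp only [ne_eq]
    by_cases hq : ((parts[k].length : Int)) = req
    · rw [if_neg (not_not_intro hq)]
      rw [ih parts (k + 1) (by simp at h ⊢; omega)]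
      rw [hdrop, List.map_cons, hq]
      simp
    · rw [if_pos hq, hdrop, List.map_cons]
      simp [hq]

theorem is_valid_arrangement_spec : Claim_equal_is_valid_arrangement := by
  unfold Claim_equal_is_valid_arrangement Spec_is_valid_arrangement
  intro record cfg _
  unfold is_valid_arrangement is_valid_arrangement_alt
  rw [pvBScan_eq]
  rw [show (".".toList : List Char) = ['.'] from rfl, pvSplitOn_eq]
  have hlen := pvSp_filter_map (PySem.Str.strip record).toList []
  simp only [List.length_nil] at hlen
  set parts := (pvSp (PySem.Str.strip record).toList []).filter (fun p => decide (0 < p.length))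
    with hparts
  by_cases h : parts.length = cfg.length
  · simp only [h, ne_eq, not_true_eq_false, if_neg, if_false]
    rw [show ((0 : Int)) = ((0 : Nat) : Int) by simp] at *
    rw [pvALoop_eq cfg parts 0 (by omega)]
    simp [hlen]
  · simp only [ne_eq, h, not_false_eq_true, if_pos]
    rw [← hlen]
    have : parts.map (fun p => ((p.length : Int))) ≠ cfg := by
      intro he
      exact h (by simpa using congrArg List.length he)
    simp [this]
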